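-- pv_equiv track=rewrite | github.com/oht505/OSU_24FALL_CS514_Algorithm | Wk6_7/Q4_rope_cutting_problem.py | minimum_rope_cutting
-- ===== SOURCE A (Python) =====
-- def minimum_rope_cutting(n, cuts):
--     cuts = [0] + sorted(cuts) + [n]
--     m = len(cuts)
--
--     dp = [[0] * m for _ in range(m)]
--
--     for length in range(2, m):
--         for i in range(m-length):
--             j = i + length
--             dp[i][j] = float('inf')
--             for k in range(i+1, j):
--                 dp[i][j] = min(dp[i][j], dp[i][k] + dp[k][j] + (cuts[j] - cuts[i]))
--
--     return dp[0][m-1]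
-- ===== SOURCE B (Python) =====
-- def minimum_rope_cutting(n, cuts):
--     pts = [0] + sorted(cuts) + [n]
--     memo = {}
--
--     def cost(i, j):
--         if j - i < 2:
--             return 0
--         if (i, j) in memo:
--             return memo[(i, j)]
--         best = min(cost(i, k) + cost(k, j) + pts[j] - pts[i] for k in range(i + 1, j))
--         memo[(i, j)] = best
--         return best
--
--     return cost(0, len(pts) - 1)
-- ===== Notes on version B (the rewrite author's own statement) =====
-- stated objective: alternative
-- what changed: Replaced the bottom-up 2D table filled by three nested index loops with a top-down memoized recursion over intervals (dict memo, min over a generator), reaching only the subintervals the answer needs.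
import Mathlib
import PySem

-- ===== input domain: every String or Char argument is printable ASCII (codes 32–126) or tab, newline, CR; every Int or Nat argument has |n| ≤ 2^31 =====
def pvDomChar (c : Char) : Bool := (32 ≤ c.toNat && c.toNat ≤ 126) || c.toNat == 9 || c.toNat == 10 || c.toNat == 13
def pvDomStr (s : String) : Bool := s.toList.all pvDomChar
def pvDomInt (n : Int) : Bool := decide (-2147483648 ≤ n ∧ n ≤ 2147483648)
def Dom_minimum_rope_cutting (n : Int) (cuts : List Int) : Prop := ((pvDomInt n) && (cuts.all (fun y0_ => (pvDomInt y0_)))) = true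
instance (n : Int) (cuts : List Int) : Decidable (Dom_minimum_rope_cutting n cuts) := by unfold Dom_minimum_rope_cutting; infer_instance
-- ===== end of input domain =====

-- B replaces A's bottom-up interval-DP table (three nested index loops) by a top-down
-- memoized recursion over intervals; same O(m^3) work, a genuinely different decomposition.

-- Python's running `min` started from float('inf'): `none` encodes the infinity,
-- which is always replaced because every inner k-range below is nonempty.
def pyMinAcc (acc : Option Int) (v : Int) : Option Int :=
  some (match acc with | none => v | some a => min a v)

-- ===== PORT A =====
-- The m×m list-of-lists dp is represented as a function Nat → Nat → Int updated
-- pointwise (same cells, same values); range(a,b) over these nonnegative bounds is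
-- List.range' a (b-a).
def minimum_rope_cutting (n : Int) (cuts : List Int) : Int :=
  let c : List Int := [0] ++ PySem.List.sorted cuts (fun x => x) false ++ [n]
  let m := c.length
  let dp0 : Nat → Nat → Int := fun _ _ => 0
  let dp := (List.range' 2 (m - 2)).foldl (fun dp length =>
      (List.range' 0 (m - length)).foldl (fun dp i =>
        let j := i + length
        -- dp[i][j] = float('inf'), then the k-loop takes running mins
        let cell := (List.range' (i + 1) (j - (i + 1))).foldl
          (fun acc k => pyMinAcc acc (dp i k + dp k j + (c.getD j 0 - c.getD i 0))) none
        fun a b => if a = i ∧ b = j then cell.getD 0 else dp a b) dp) dp0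
  dp 0 (m - 1)

-- ===== PORT B =====
-- cost(i, j) threading the memo dict through the recursion; the fuel parameter (always
-- sufficient: the interval shrinks at every call) only makes the recursion structural.
def mrcCost (c : List Int) : Nat → Nat → Nat → PySem.Dict (Nat × Nat) Int →
    Int × PySem.Dict (Nat × Nat) Int
  | 0, _, _, memo => (0, memo)
  | fuel + 1, i, j, memo =>
    if j < i + 2 then (0, memo)
    else
      match memo.get? (i, j) with
      | some v => (v, memo)
      | none =>
        let st := (List.range' (i + 1) (j - (i + 1))).foldl
          (fun (st : Option Int × PySem.Dict (Nat × Nat) Int) k =>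
            let r1 := mrcCost c fuel i k st.2
            let r2 := mrcCost c fuel k j r1.2
            (pyMinAcc st.1 (r1.1 + r2.1 + c.getD j 0 - c.getD i 0), r2.2)) (none, memo)
        let best := st.1.getD 0
        (best, st.2.insert (i, j) best)

def minimum_rope_cutting_alt (n : Int) (cuts : List Int) : Int :=
  let pts : List Int := [0] ++ PySem.List.sorted cuts (fun x => x) false ++ [n]
  (mrcCost pts pts.length 0 (pts.length - 1) PySem.Dict.empty).1

-- ===== PRECONDITION & SPEC =====
def Spec_minimum_rope_cutting (n : Int) (cuts : List Int) (out : Int) : Prop := out = minimum_rope_cutting_alt n cuts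
instance (n : Int) (cuts : List Int) (out : Int) : Decidable (Spec_minimum_rope_cutting n cuts out) := by unfold Spec_minimum_rope_cutting; infer_instance

-- ===== CLAIM (what is proved, stated in full; the proofs are below) =====
def Claim_equal_minimum_rope_cutting : Prop := ∀ (n : Int) (cuts : List Int), Dom_minimum_rope_cutting n cuts → Spec_minimum_rope_cutting n cuts (minimum_rope_cutting n cuts)

-- ===== LEMMAS AND PROOFS =====

-- The pure interval-DP recurrence both programs compute.
def fspec (c : List Int) (i j : Nat) : Int :=
  if _h : j < i + 2 then 0
  else
    ((List.range' (i + 1) (j - (i + 1))).attach.foldl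
      (fun acc kk => pyMinAcc acc (fspec c i kk.1 + fspec c kk.1 j + c.getD j 0 - c.getD i 0))
      none).getD 0
termination_by j - i
decreasing_by
  all_goals (have hk := kk.2; rw [List.mem_range'_1] at hk; omega)

theorem fspec_base (c : List Int) (i j : Nat) (h : j < i + 2) : fspec c i j = 0 := by
  rw [fspec]; simp [h]

theorem fspec_step (c : List Int) (i j : Nat) (h : ¬ j < i + 2) :
    fspec c i j =
      ((List.range' (i + 1) (j - (i + 1))).foldl
        (fun acc k => pyMinAcc acc (fspec c i k + fspec c k j + c.getD j 0 - c.getD i 0))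
        none).getD 0 := by
  rw [fspec]; simp [h]

-- ---------- A side ----------

def InvA (c : List Int) (L : Nat) (dp : Nat → Nat → Int) : Prop :=
  ∀ a b : Nat, dp a b = if a + 2 ≤ b ∧ b ≤ c.length - 1 ∧ b ≤ a + L then fspec c a b else 0

def Inv2 (c : List Int) (L I : Nat) (dp : Nat → Nat → Int) : Prop :=
  ∀ a b : Nat, dp a b =
    if a + 2 ≤ b ∧ b ≤ c.length - 1 ∧ (b ≤ a + L ∨ (b = a + L + 1 ∧ a < I)) then fspec c a b else 0

theorem cell_eq (c : List Int) (L I : Nat) (dp : Nat → Nat → Int)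
    (hI : I + L + 1 ≤ c.length - 1) (hL : 1 ≤ L) (h2 : Inv2 c L I dp) :
    ((List.range' (I + 1) ((I + L + 1) - (I + 1))).foldl
      (fun acc k => pyMinAcc acc (dp I k + dp k (I + L + 1) + (c.getD (I + L + 1) 0 - c.getD I 0))) none).getD 0
      = fspec c I (I + L + 1) := by
  have hr : (I + L + 1) - (I + 1) = L := by omega
  rw [fspec_step c I (I + L + 1) (by omega), hr]
  congr 1
  apply PySem.List.foldl_congr_mem
  intro acc k hk
  rw [List.mem_range'_1] at hk
  have hik : dp I k = fspec c I k := by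
    rw [h2 I k]
    split_ifs with hcnd
    · rfl
    · rw [fspec_base c I k (by omega)]
  have hkj : dp k (I + L + 1) = fspec c k (I + L + 1) := by
    rw [h2 k (I + L + 1)]
    split_ifs with hcnd
    · rfl
    · rw [fspec_base c k (I + L + 1) (by omega)]
  have harith : dp I k + dp k (I + L + 1) + (c.getD (I + L + 1) 0 - c.getD I 0)
      = fspec c I k + fspec c k (I + L + 1) + c.getD (I + L + 1) 0 - c.getD I 0 := by
    rw [hik, hkj]; ring
  rw [harith]

theorem inner_fold (c : List Int) (ℓ L : Nat) (hℓ : ℓ = L + 1) (dp : Nat → Nat → Int)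
    (hL : 1 ≤ L) (hA : InvA c L dp) :
    InvA c ℓ ((List.range' 0 (c.length - ℓ)).foldl (fun dp i =>
        let j := i + ℓ
        let cell := (List.range' (i + 1) (j - (i + 1))).foldl
          (fun acc k => pyMinAcc acc (dp i k + dp k j + (c.getD j 0 - c.getD i 0))) none
        fun a b => if a = i ∧ b = j then cell.getD 0 else dp a b) dp) := by
  subst hℓ
  have key : ∀ t : Nat, t ≤ c.length - (L + 1) →
      Inv2 c L t ((List.range' 0 t).foldl (fun dp i =>
        let j := i + (L + 1)
        let cell := (List.range' (i + 1) (j - (i + 1))).foldl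
          (fun acc k => pyMinAcc acc (dp i k + dp k j + (c.getD j 0 - c.getD i 0))) none
        fun a b => if a = i ∧ b = j then cell.getD 0 else dp a b) dp) := by
    intro t
    induction t with
    | zero =>
      intro _
      have h0 : List.range' 0 0 = ([] : List Nat) := rfl
      rw [h0]
      intro a b
      rw [List.foldl_nil, hA a b]
      split_ifs <;> first | rfl | omega
    | succ t ih =>
      intro ht
      have hrange : List.range' 0 (t + 1) = List.range' 0 t ++ [t] := by
        have := List.range'_concat (step := 1) (s := 0) (n := t)
        simpa using this
      rw [hrange, List.foldl_append]
      simp only [List.foldl_cons, List.foldl_nil]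
      have h2 := ih (by omega)
      have hIb : t + L + 1 ≤ c.length - 1 := by omega
      have hcell := cell_eq c L t _ hIb hL h2
      intro a b
      dsimp only
      by_cases hab : a = t ∧ b = t + (L + 1)
      · obtain ⟨ha, hb2⟩ := hab
        subst hb2; subst ha
        have e1 : (a = a ∧ a + (L + 1) = a + (L + 1)) := ⟨rfl, rfl⟩
        rw [if_pos e1]
        have e2 : (a + 2 ≤ a + (L + 1) ∧ a + (L + 1) ≤ c.length - 1 ∧
            (a + (L + 1) ≤ a + L ∨ (a + (L + 1) = a + L + 1 ∧ a < a + 1))) :=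
          ⟨by omega, by omega, Or.inr ⟨by omega, by omega⟩⟩
        rw [if_pos e2]
        have e3 : a + (L + 1) = a + L + 1 := by omega
        rw [e3]
        exact hcell
      · rw [if_neg hab, h2 a b]
        split_ifs <;> first | rfl | omega
  have h := key (c.length - (L + 1)) (le_refl _)
  intro a b
  rw [h a b]
  split_ifs <;> first | rfl | omega

theorem A_eq_fspec (n : Int) (cuts : List Int) :
    minimum_rope_cutting n cuts =
      fspec ([0] ++ PySem.List.sorted cuts (fun x => x) false ++ [n])
        0 (([0] ++ PySem.List.sorted cuts (fun x => x) false ++ [n]).length - 1) := by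
  show (List.range' 2 (([0] ++ PySem.List.sorted cuts (fun x => x) false ++ [n]).length - 2)).foldl
      (fun dp length =>
        (List.range' 0 (([0] ++ PySem.List.sorted cuts (fun x => x) false ++ [n]).length - length)).foldl
          (fun dp i =>
            let j := i + length
            let cell := (List.range' (i + 1) (j - (i + 1))).foldl
              (fun acc k => pyMinAcc acc (dp i k + dp k j +
                (([0] ++ PySem.List.sorted cuts (fun x => x) false ++ [n]).getD j 0 -
                 ([0] ++ PySem.List.sorted cuts (fun x => x) false ++ [n]).getD i 0))) none
            fun a b => if a = i ∧ b = j then cell.getD 0 else dp a b) dp)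
      (fun _ _ => 0) 0 (([0] ++ PySem.List.sorted cuts (fun x => x) false ++ [n]).length - 1)
    = fspec ([0] ++ PySem.List.sorted cuts (fun x => x) false ++ [n])
        0 (([0] ++ PySem.List.sorted cuts (fun x => x) false ++ [n]).length - 1)
  set c : List Int := [0] ++ PySem.List.sorted cuts (fun x => x) false ++ [n] with hc
  set m := c.length with hm
  have hm2 : 2 ≤ m := by
    rw [hm, hc]
    simp only [List.length_append, List.length_cons, List.length_nil]
    omega
  have outer : ∀ t : Nat,
      InvA c (t + 1) ((List.range' 2 t).foldl (fun dp length =>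
        (List.range' 0 (m - length)).foldl (fun dp i =>
          let j := i + length
          let cell := (List.range' (i + 1) (j - (i + 1))).foldl
            (fun acc k => pyMinAcc acc (dp i k + dp k j + (c.getD j 0 - c.getD i 0))) none
          fun a b => if a = i ∧ b = j then cell.getD 0 else dp a b) dp)
        (fun _ _ => 0)) := by
    intro t
    induction t with
    | zero =>
      intro a b
      simp only [List.range', List.foldl_nil]
      split_ifs <;> first | rfl | omega
    | succ t ih =>
      have hrange : List.range' 2 (t + 1) = List.range' 2 t ++ [2 + t] := by
        have := List.range'_concat (step := 1) (s := 2) (n := t)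
        simpa using this
      rw [hrange, List.foldl_append]
      simp only [List.foldl_cons, List.foldl_nil]
      have h := inner_fold c (2 + t) (t + 1) (by omega) _ (by omega) ih
      rw [← hm] at h
      intro a b
      rw [h a b]
      split_ifs <;> first | rfl | omega
  have h := outer (m - 2)
  rw [(by omega : m - 2 + 1 = m - 1)] at h
  rw [h 0 (m - 1)]
  split_ifs with hcnd
  · rfl
  · rw [fspec_base c 0 (m - 1) (by omega)]

-- ---------- B side ----------

def InvM (c : List Int) (memo : PySem.Dict (Nat × Nat) Int) : Prop :=
  ∀ p v, memo.get? p = some v → v = fspec c p.1 p.2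

theorem B_aux (c : List Int) (fuel : Nat) (i j : Nat)
    (ih : ∀ (i' j' : Nat) (memo : PySem.Dict (Nat × Nat) Int), j' - i' ≤ fuel → InvM c memo →
      (mrcCost c fuel i' j' memo).1 = fspec c i' j' ∧ InvM c (mrcCost c fuel i' j' memo).2)
    (hd : j - i ≤ fuel + 1) :
    ∀ (l : List Nat), (∀ k ∈ l, i + 1 ≤ k ∧ k < j) →
      ∀ (acc : Option Int) (memo0 : PySem.Dict (Nat × Nat) Int), InvM c memo0 →
      (l.foldl (fun (st : Option Int × PySem.Dict (Nat × Nat) Int) k =>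
        (pyMinAcc st.1 ((mrcCost c fuel i k st.2).1 +
            (mrcCost c fuel k j (mrcCost c fuel i k st.2).2).1 + c.getD j 0 - c.getD i 0),
         (mrcCost c fuel k j (mrcCost c fuel i k st.2).2).2)) (acc, memo0)).1 =
        l.foldl (fun acc k =>
          pyMinAcc acc (fspec c i k + fspec c k j + c.getD j 0 - c.getD i 0)) acc ∧
      InvM c (l.foldl (fun (st : Option Int × PySem.Dict (Nat × Nat) Int) k =>
        (pyMinAcc st.1 ((mrcCost c fuel i k st.2).1 +
            (mrcCost c fuel k j (mrcCost c fuel i k st.2).2).1 + c.getD j 0 - c.getD i 0),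
         (mrcCost c fuel k j (mrcCost c fuel i k st.2).2).2)) (acc, memo0)).2 := by
  intro l
  induction l with
  | nil => intro _ acc memo0 h0; exact ⟨rfl, h0⟩
  | cons k t iht =>
    intro hl acc memo0 h0
    have hk := hl k (List.mem_cons_self ..)
    have h1 := ih i k memo0 (by omega) h0
    have h2 := ih k j (mrcCost c fuel i k memo0).2 (by omega) h1.2
    simp only [List.foldl_cons]
    rw [h1.1, h2.1]
    exact iht (fun k' hk' => hl k' (List.mem_cons_of_mem _ hk')) _ _ h2.2

theorem B_correct (fuel : Nat) (c : List Int) (i j : Nat) (memo : PySem.Dict (Nat × Nat) Int)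
    (hd : j - i ≤ fuel) (hm : InvM c memo) :
    (mrcCost c fuel i j memo).1 = fspec c i j ∧ InvM c (mrcCost c fuel i j memo).2 := by
  induction fuel generalizing i j memo with
  | zero =>
    simp only [mrcCost]
    rw [fspec_base c i j (by omega)]
    exact ⟨rfl, hm⟩
  | succ fuel ih =>
    simp only [mrcCost]
    by_cases hb : j < i + 2
    · rw [if_pos hb, fspec_base c i j hb]
      exact ⟨rfl, hm⟩
    · rw [if_neg hb]
      cases hg : memo.get? (i, j) with
      | some v =>
        dsimp only
        exact ⟨hm (i, j) v hg, hm⟩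
      | none =>
        dsimp only
        have hfold := B_aux c fuel i j (fun i' j' memo' h' hm' => ih i' j' memo' h' hm')
          hd (List.range' (i + 1) (j - (i + 1)))
          (fun k hk => by rw [List.mem_range'_1] at hk; omega) none memo hm
        have hbest : (((List.range' (i + 1) (j - (i + 1))).foldl
      (fun (st : Option Int × PySem.Dict (Nat × Nat) Int) k =>
        (pyMinAcc st.1 ((mrcCost c fuel i k st.2).1 +
            (mrcCost c fuel k j (mrcCost c fuel i k st.2).2).1 + c.getD j 0 - c.getD i 0),
         (mrcCost c fuel k j (mrcCost c fuel i k st.2).2).2)) (none, memo)).1).getD 0 = fspec c i j :=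
          (congrArg (fun o : Option Int => o.getD 0) hfold.1).trans
            (fspec_step c i j hb).symm
        refine ⟨hbest, ?_⟩
        intro p v hv
        rw [PySem.Dict.get?_insert] at hv
        by_cases hp : p = (i, j)
        · rw [if_pos hp] at hv
          injection hv with hv2
          subst hp
          rw [← hv2]
          exact hbest
        · rw [if_neg hp] at hv
          exact hfold.2 p v hv

-- ===== VERDICT (by name: the statement is the Claim_ definition above) =====
theorem minimum_rope_cutting_spec : Claim_equal_minimum_rope_cutting := by
  intro n cuts _
  unfold Spec_minimum_rope_cutting minimum_rope_cutting_alt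
  rw [A_eq_fspec]
  exact ((B_correct (([0] ++ PySem.List.sorted cuts (fun x => x) false ++ [n]).length)
    _ 0 (([0] ++ PySem.List.sorted cuts (fun x => x) false ++ [n]).length - 1)
    PySem.Dict.empty (by omega)
    (by intro p v hv; simp [PySem.Dict.get?_empty] at hv)).1).symm
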